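-- pv_equiv track=rewrite | github.com/transformerlab/transformerlab-app | api/transformerlab/services/profiler_service.py | _choose_label_column
-- ===== SOURCE A (Python) =====
-- def _choose_label_column(columns: list[str]) -> str | None:
--     candidates = [
--         "shortName",
--         "demangledName",
--         "name",
--         "label",
--         "text",
--         "message",
--         "symbolName",
--         "kernelName",
--         "value",
--     ]
--     lowered_map = {col.lower(): col for col in columns}
--     for candidate in candidates:
--         match = lowered_map.get(candidate.lower())
--         if match:
--             return match
--     return None
-- ===== SOURCE B (Python) =====
-- def _choose_label_column(columns: list[str]) -> str | None:
--     # Single pass over the columns: pick the column whose lowercased name has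
--     # the highest priority (lowest rank); among equal-priority columns later
--     # ones override earlier ones.
--     candidates = [
--         "shortName",
--         "demangledName",
--         "name",
--         "label",
--         "text",
--         "message",
--         "symbolName",
--         "kernelName",
--         "value",
--     ]
--     rank = {c.lower(): i for i, c in enumerate(candidates)}
--     best = None
--     best_rank = len(candidates)
--     for col in columns:
--         r = rank.get(col.lower())
--         if r is not None and r <= best_rank:
--             best, best_rank = col, r
--     return best
-- ===== Notes on version B (the rewrite author's own statement) =====
-- stated objective: alternative
-- what changed: Replaced the lowered-dict-then-candidate-priority-loop with a single pass over the columns that tracks the best (lowest-rank) match via a candidate->priority rank table, later columns overriding earlier ones of equal priority.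
import Mathlib
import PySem

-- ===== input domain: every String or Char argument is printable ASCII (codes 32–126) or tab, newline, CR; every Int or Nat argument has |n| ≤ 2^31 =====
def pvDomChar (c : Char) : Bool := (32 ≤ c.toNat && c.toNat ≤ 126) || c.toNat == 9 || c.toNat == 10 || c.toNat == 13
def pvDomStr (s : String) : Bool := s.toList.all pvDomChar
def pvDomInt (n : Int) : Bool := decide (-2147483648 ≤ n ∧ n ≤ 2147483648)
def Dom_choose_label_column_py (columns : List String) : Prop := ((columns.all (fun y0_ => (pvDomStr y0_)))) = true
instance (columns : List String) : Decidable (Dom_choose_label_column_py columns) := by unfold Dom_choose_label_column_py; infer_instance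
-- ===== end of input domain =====

-- B replaces A's lowered-dict + candidate-priority loop with a single pass over the columns
-- tracking the best (lowest-rank) match via a candidate->priority rank table (objective: alternative).


-- ===== PORT A =====
def pvCandidates : List String :=
  ["shortName", "demangledName", "name", "label", "text", "message",
   "symbolName", "kernelName", "value"]

-- the 'for candidate in candidates' loop of A
def pvLoopA (m : PySem.Dict String String) : List String → Option String
  | [] => none
  | cand :: rest =>
    match m.get? (PySem.Str.lower cand) with
    | some s => if s ≠ "" then some s else pvLoopA m rest
    | none => pvLoopA m rest

def choose_label_column_py (columns : List String) : Option String :=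
  let lowered_map : PySem.Dict String String :=
    columns.foldl (fun d col => d.insert (PySem.Str.lower col) col) PySem.Dict.empty
  pvLoopA lowered_map pvCandidates

-- ===== PORT B =====
-- rank = {c.lower(): i for i, c in enumerate(candidates)}
def pvRankDict : PySem.Dict String Int :=
  (PySem.List.enumerate pvCandidates).foldl
    (fun d p => d.insert (PySem.Str.lower p.2) p.1) PySem.Dict.empty

-- single pass: state = (best, best_rank)
def choose_label_column_py_alt (columns : List String) : Option String :=
  (columns.foldl
    (fun (st : Option String × Int) col =>
      match pvRankDict.get? (PySem.Str.lower col) with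
      | some r => if r ≤ st.2 then (some col, r) else st
      | none => st)
    (none, (pvCandidates.length : Int))).1

-- ===== PRECONDITION & SPEC =====
def Spec_choose_label_column_py (columns : List String) (out : Option String) : Prop := out = choose_label_column_py_alt columns
instance (columns : List String) (out : Option String) : Decidable (Spec_choose_label_column_py columns out) := by unfold Spec_choose_label_column_py; infer_instance

-- ===== CLAIM (what is proved, stated in full; the proofs are below) =====
def Claim_equal_choose_label_column_py : Prop := ∀ (columns : List String), Dom_choose_label_column_py columns → Spec_choose_label_column_py columns (choose_label_column_py columns)

-- ===== LEMMAS AND PROOFS =====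

-- last column in xs whose lowercase equals k (what A's dict stores at k)
def pvLastScan (xs : List String) (k : String) : Option String :=
  xs.foldl (fun acc col => if PySem.Str.lower col == k then some col else acc) none

-- first index (from i) of x in cs
def pvIdx : List String → String → Int → Option Int
  | [], _, _ => none
  | k :: rest, x, i => if k = x then some i else pvIdx rest x (i + 1)

-- value and absolute index of the first key in cs (numbered from i) that some column matches
def pvFirstHit (xs : List String) : List String → Int → Option (String × Int)
  | [], _ => none
  | k :: rest, i =>
    match pvLastScan xs k with
    | some s => some (s, i)
    | none => pvFirstHit xs rest (i + 1)

-- the lowered candidate list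
def pvKs : List String := pvCandidates.map PySem.Str.lower

-- looking up k in the dict A builds equals the last-match scan of the columns
theorem pv_get_eq_scan (columns : List String) (k : String) (d : PySem.Dict String String) :
    (columns.foldl (fun d col => d.insert (PySem.Str.lower col) col) d).get? k =
      columns.foldl (fun acc col => if PySem.Str.lower col == k then some col else acc)
        (d.get? k) := by
  induction columns generalizing d with
  | nil => rfl
  | cons c cs ih =>
    simp only [List.foldl_cons, ih]
    congr 1
    by_cases h : PySem.Str.lower c == k
    · simp_all [eq_of_beq h]
    · have h' : k ≠ PySem.Str.lower c := fun e => h (by simp [e])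
      simp [PySem.Dict.get?_insert, h, h']

theorem pvLastScan_some_lower (xs : List String) (k s : String)
    (acc : Option String) (hacc : ∀ t, acc = some t → PySem.Str.lower t = k)
    (h : xs.foldl (fun acc col => if PySem.Str.lower col == k then some col else acc) acc = some s) :
    PySem.Str.lower s = k := by
  induction xs generalizing acc with
  | nil => exact hacc s h
  | cons c cs ih =>
    refine ih _ ?_ h
    intro t ht
    by_cases hc : PySem.Str.lower c == k
    · simp only [] at ht ⊢
      simp [hc] at ht
      subst ht; exact eq_of_beq hc
    · simp only [hc] at ht
      simp at ht
      exact hacc t ht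

theorem pvLastScan_append (xs : List String) (x k : String) :
    pvLastScan (xs ++ [x]) k =
      if PySem.Str.lower x == k then some x else pvLastScan xs k := by
  simp [pvLastScan, List.foldl_append]

theorem pvIdx_lb (cs : List String) (x : String) (i j : Int) (h : pvIdx cs x i = some j) : i ≤ j := by
  induction cs generalizing i with
  | nil => simp [pvIdx] at h
  | cons k rest ih =>
    simp only [pvIdx] at h
    split at h
    · simp at h; omega
    · have := ih (i + 1) h; omega

theorem pvIdx_ub (cs : List String) (x : String) (i j : Int) (h : pvIdx cs x i = some j) :
    j < i + cs.length := by
  induction cs generalizing i with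
  | nil => simp [pvIdx] at h
  | cons k rest ih =>
    simp only [pvIdx] at h
    split at h
    · simp at h; simp; omega
    · have := ih (i + 1) h; simp; omega

theorem pvFirstHit_lb (xs : List String) (cs : List String) (i : Int) (s : String) (a : Int)
    (h : pvFirstHit xs cs i = some (s, a)) : i ≤ a := by
  induction cs generalizing i with
  | nil => simp [pvFirstHit] at h
  | cons k rest ih =>
    simp only [pvFirstHit] at h
    split at h
    · simp at h; omega
    · have := ih (i + 1) h; omega

theorem pvFirstHit_append (xs : List String) (x : String) (cs : List String) (i : Int) :
    pvFirstHit (xs ++ [x]) cs i =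
      match pvIdx cs (PySem.Str.lower x) i with
      | none => pvFirstHit xs cs i
      | some j =>
        match pvFirstHit xs cs i with
        | none => some (x, j)
        | some (s, a) => if j ≤ a then some (x, j) else some (s, a) := by
  induction cs generalizing i with
  | nil => rfl
  | cons k rest ih =>
    by_cases hk : k = PySem.Str.lower x
    · subst hk
      have hL : pvFirstHit (xs ++ [x]) (PySem.Str.lower x :: rest) i = some (x, i) := by
        simp [pvFirstHit, pvLastScan_append]
      rw [hL]
      simp only [pvIdx, if_pos]
      cases hF : pvFirstHit xs (PySem.Str.lower x :: rest) i with
      | none => simp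
      | some p =>
        obtain ⟨s, a⟩ := p
        have hia := pvFirstHit_lb xs _ i s a hF
        simp [if_pos hia]
    · have hb : (PySem.Str.lower x == k) = false :=
        beq_eq_false_iff_ne.mpr (fun e => hk e.symm)
      have hL : pvLastScan (xs ++ [x]) k = pvLastScan xs k := by
        rw [pvLastScan_append]; simp [hb]
      simp only [pvFirstHit, hL, pvIdx, if_neg hk]
      cases hS : pvLastScan xs k with
      | some s =>
        cases hJ : pvIdx rest (PySem.Str.lower x) (i + 1) with
        | none => simp
        | some j =>
          have hlb := pvIdx_lb rest _ (i + 1) j hJ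
          simp [if_neg (show ¬ j ≤ i by omega)]
      | none =>
        exact ih (i + 1)

-- the rank dict looks up to the first index in the lowered candidate list
theorem pvRank_eq_pvIdx (k : String) : pvRankDict.get? k = pvIdx pvKs k 0 := by
  have h : pvRankDict = PySem.Dict.mk
      [("shortname", 0), ("demangledname", 1), ("name", 2), ("label", 3), ("text", 4),
       ("message", 5), ("symbolname", 6), ("kernelname", 7), ("value", 8)] := by decide
  have hks : pvKs = ["shortname", "demangledname", "name", "label", "text",
       "message", "symbolname", "kernelname", "value"] := by decide
  rw [h, hks]
  simp only [PySem.Dict.get?_mk_cons, pvIdx]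
  norm_num [beq_iff_eq, PySem.Dict.get?]

-- B's single pass computes the first hit (value and its rank)
theorem pvFold_eq_firstHit (xs : List String) :
    xs.foldl
        (fun (st : Option String × Int) col =>
          match pvRankDict.get? (PySem.Str.lower col) with
          | some r => if r ≤ st.2 then (some col, r) else st
          | none => st)
        (none, (pvCandidates.length : Int)) =
      (match pvFirstHit xs pvKs 0 with
       | none => (none, (pvCandidates.length : Int))
       | some (s, a) => (some s, a)) := by
  induction xs using List.reverseRecOn with
  | nil => rfl
  | append_singleton xs x ih =>
    rw [List.foldl_append, List.foldl_cons, List.foldl_nil, ih,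
      pvFirstHit_append xs x pvKs 0, pvRank_eq_pvIdx]
    cases hJ : pvIdx pvKs (PySem.Str.lower x) 0 with
    | none => simp
    | some j =>
      have hj0 : 0 ≤ j := pvIdx_lb _ _ _ _ hJ
      have hju : j < 0 + pvKs.length := pvIdx_ub _ _ _ _ hJ
      have hlen : pvKs.length = pvCandidates.length := by decide
      cases hF : pvFirstHit xs pvKs 0 with
      | none =>
        have : j ≤ (pvCandidates.length : Int) := by
          simp [hlen] at hju ⊢; omega
        simp [this]
      | some p =>
        obtain ⟨s, a⟩ := p
        by_cases hja : j ≤ a <;> simp [hja]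

-- A's candidate loop computes the first hit's value
theorem pvLoopA_eq_firstHit (xs : List String) (cs : List String) (i : Int)
    (hne : ∀ c ∈ cs, PySem.Str.lower c ≠ "") :
    pvLoopA (xs.foldl (fun d col => d.insert (PySem.Str.lower col) col) PySem.Dict.empty) cs =
      (pvFirstHit xs (cs.map PySem.Str.lower) i).map (·.1) := by
  induction cs generalizing i with
  | nil => rfl
  | cons cand rest ih =>
    have hget := pv_get_eq_scan xs (PySem.Str.lower cand) PySem.Dict.empty
    simp only [pvLoopA, hget, PySem.Dict.get?_empty, List.map_cons, pvFirstHit]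
    cases hS : pvLastScan xs (PySem.Str.lower cand) with
    | some s =>
      have hl : PySem.Str.lower s = PySem.Str.lower cand := by
        refine pvLastScan_some_lower xs _ s none (by simp) ?_
        simpa [pvLastScan] using hS
      have hs : s ≠ "" := by
        intro e
        have : PySem.Str.lower cand = "" := by rw [← hl, e]; decide
        exact hne cand (by simp) this
      simp only [pvLastScan] at hS
      simp only [beq_iff_eq] at hS
      simp [hS, hs]
    | none =>
      simp only [pvLastScan] at hS
      simp only [beq_iff_eq] at hS
      simp [hS, ih (i + 1) (fun c hc => hne c (by simp [hc]))]

-- ===== VERDICT (by name: the statement is the Claim_ definition above) =====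
theorem choose_label_column_py_spec : Claim_equal_choose_label_column_py := by
  intro columns _
  unfold Spec_choose_label_column_py choose_label_column_py choose_label_column_py_alt
  rw [pvFold_eq_firstHit columns,
    pvLoopA_eq_firstHit columns pvCandidates 0 (by decide)]
  have hmap : pvCandidates.map PySem.Str.lower = pvKs := rfl
  rw [hmap]
  cases pvFirstHit columns pvKs 0 with
  | none => rfl
  | some p => cases p; rfl
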